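-- pv_equiv track=rewrite | github.com/TingjiaInFuture/pixrep | pixrep/flowables.py | _is_simple_number
-- ===== SOURCE A (Python) =====
-- def _is_simple_number(word: str) -> bool:
--     if not word:
--         return False
--     dot_seen = False
--     for ch in word:
--         if ch == ".":
--             if dot_seen:
--                 return False
--             dot_seen = True
--             continue
--         if not ch.isdigit():
--             return False
--     return True
-- ===== SOURCE B (Python) =====
-- def _is_simple_number(word: str) -> bool:
--     if not word:
--         return False
--     head, _, tail = word.partition(".")
--     if "." in tail:
--         return False
--     return (head == "" or head.isdigit()) and (tail == "" or tail.isdigit())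
-- ===== Notes on version B (the rewrite author's own statement) =====
-- stated objective: alternative
-- what changed: Replaces A's character-by-character scan with a dot_seen flag by a parse-style decomposition: partition the word at the first dot into integer and fractional parts, reject a second dot in the remainder, and validate each part independently with str.isdigit (empty parts allowed).
import Mathlib
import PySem

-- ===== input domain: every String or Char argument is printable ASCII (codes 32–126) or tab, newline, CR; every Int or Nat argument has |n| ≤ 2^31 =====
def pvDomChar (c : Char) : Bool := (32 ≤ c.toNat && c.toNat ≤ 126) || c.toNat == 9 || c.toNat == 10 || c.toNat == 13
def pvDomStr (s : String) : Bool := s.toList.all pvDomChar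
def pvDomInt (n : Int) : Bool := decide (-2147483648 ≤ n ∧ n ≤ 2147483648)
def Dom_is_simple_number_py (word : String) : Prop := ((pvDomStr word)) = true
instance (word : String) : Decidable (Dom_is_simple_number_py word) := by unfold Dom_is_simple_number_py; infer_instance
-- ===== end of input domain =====

-- B replaces A's stateful char scan by a parse-style decomposition: partition at the
-- first dot into integer/fractional parts and validate each part independently.

-- ===== PORT A =====
-- the for-loop of A, carrying dot_seen; early returns become false results
def isSimpleLoop : List Char → Bool → Bool
  | [], _ => true
  | ch :: rest, dotSeen =>
      if ch == '.' then
        if dotSeen then false else isSimpleLoop rest true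
      else if PySem.Chars.isdigit ch then isSimpleLoop rest dotSeen
      else false

def is_simple_number_py (word : String) : Bool :=
  if word.toList.isEmpty then false else isSimpleLoop word.toList false

-- ===== PORT B =====
-- word.partition("."): (head, found-a-separator flag, tail); exact for a one-char separator
def partDot : List Char → List Char × Bool × List Char
  | [] => ([], false, [])
  | c :: t =>
      if c == '.' then ([], true, t)
      else
        let (h, s, r) := partDot t
        (c :: h, s, r)

-- str.isdigit: False on "", else every char a digit
def pyIsDigitStr (l : List Char) : Bool := !l.isEmpty && l.all PySem.Chars.isdigit

def is_simple_number_py_alt (word : String) : Bool :=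
  let l := word.toList
  if l.isEmpty then false
  else
    let (head, _, tail) := partDot l
    if tail.any (· == '.') then false
    else (head.isEmpty || pyIsDigitStr head) && (tail.isEmpty || pyIsDigitStr tail)

-- ===== PRECONDITION & SPEC =====
def Spec_is_simple_number_py (word : String) (out : Bool) : Prop := out = is_simple_number_py_alt word
instance (word : String) (out : Bool) : Decidable (Spec_is_simple_number_py word out) := by unfold Spec_is_simple_number_py; infer_instance

-- ===== CLAIM (what is proved, stated in full; the proofs are below) =====
def Claim_equal_is_simple_number_py : Prop := ∀ (word : String), Dom_is_simple_number_py word → Spec_is_simple_number_py word (is_simple_number_py word)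

-- ===== LEMMAS AND PROOFS =====

-- '.' is not a digit
theorem dot_not_digit : PySem.Chars.isdigit '.' = false := by decide

-- with the flag set, the loop accepts exactly the all-digit strings
theorem isSimpleLoop_true (l : List Char) :
    isSimpleLoop l true = l.all PySem.Chars.isdigit := by
  induction l with
  | nil => simp [isSimpleLoop]
  | cons c t ih =>
      by_cases hc : c = '.'
      · subst hc; simp [isSimpleLoop, dot_not_digit]
      · have hc' : (c == '.') = false := by simpa using hc
        by_cases hd : PySem.Chars.isdigit c = true
        · simp [isSimpleLoop, hc', hd, ih]
        · have hd' : PySem.Chars.isdigit c = false := by simpa using hd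
          simp [isSimpleLoop, hc', hd']

-- a list containing a dot is not all digits
theorem any_dot_not_all_digit (l : List Char) (h : l.any (· == '.') = true) :
    l.all PySem.Chars.isdigit = false := by
  rcases List.any_eq_true.mp h with ⟨c, hc, he⟩
  have hcd : c = '.' := by simpa using he
  subst hcd
  by_contra hne
  have hall : l.all PySem.Chars.isdigit = true := by
    cases hv : l.all PySem.Chars.isdigit
    · exact absurd hv hne
    · rfl
  have := List.all_eq_true.mp hall _ hc
  simp [dot_not_digit] at this

-- the loop with the flag clear equals the partition-based characterisation
theorem isSimpleLoop_false (l : List Char) :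
    isSimpleLoop l false
      = ((partDot l).1.all PySem.Chars.isdigit
          && (!(partDot l).2.1
              || (!((partDot l).2.2.any (· == '.')) && (partDot l).2.2.all PySem.Chars.isdigit))) := by
  induction l with
  | nil => simp [isSimpleLoop, partDot]
  | cons c t ih =>
      by_cases hc : c = '.'
      · subst hc
        simp only [isSimpleLoop, partDot, beq_self_eq_true, if_true, isSimpleLoop_true]
        by_cases ha : t.any (· == '.') = true
        · simp [ha, any_dot_not_all_digit t ha]
        · have ha' : t.any (· == '.') = false := Bool.eq_false_iff.mpr ha
          simp [ha']
      · have hc' : (c == '.') = false := by simpa using hc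
        by_cases hd : PySem.Chars.isdigit c = true
        · simp only [isSimpleLoop, hc', Bool.false_eq_true, if_false, hd, if_true, ih, partDot]
          simp [hd]
        · have hd' : PySem.Chars.isdigit c = false := by simpa using hd
          simp [isSimpleLoop, hc', hd', partDot]

-- empty-or-isdigit equals all-digits
theorem empty_or_digit (l : List Char) :
    (l.isEmpty || pyIsDigitStr l) = l.all PySem.Chars.isdigit := by
  cases l <;> simp [pyIsDigitStr]

-- when no separator was found, the tail is empty
theorem partDot_no_sep : ∀ (l : List Char), (partDot l).2.1 = false → (partDot l).2.2 = [] := by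
  intro l
  induction l with
  | nil => simp [partDot]
  | cons c t ih =>
      by_cases hc : (c == '.') = true
      · simp [partDot, hc]
      · have hc' : (c == '.') = false := by simpa using hc
        simpa [partDot, hc'] using ih

-- ===== VERDICT (by name: the statement is the Claim_ definition above) =====
theorem is_simple_number_py_spec : Claim_equal_is_simple_number_py := by
  intro word _
  unfold Spec_is_simple_number_py is_simple_number_py is_simple_number_py_alt
  by_cases he : word.toList.isEmpty = true
  · simp [he]
  · have he' : word.toList.isEmpty = false := by simpa using he
    simp only [he', if_false, Bool.false_eq_true]
    rw [isSimpleLoop_false]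
    rcases hpd : partDot word.toList with ⟨h, s, t⟩
    dsimp only
    simp only [empty_or_digit]
    cases s with
    | false =>
        have ht : t = [] := by simpa [hpd] using partDot_no_sep word.toList (by simp [hpd])
        subst ht; simp
    | true =>
        by_cases ha : t.any (· == '.') = true
        · simp [ha]
        · have ha' : t.any (· == '.') = false := Bool.eq_false_iff.mpr ha
          simp [ha']
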